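-- pv_equiv track=rewrite | github.com/samuelo49/DS-ALGOS | hashtable/puzzlearrangements.py | puzzleArrangements
-- ===== SOURCE A (Python) =====
-- def puzzleArrangements(pieces, targetSize):
--     arrangements = 0
--     n = len(pieces)
--     for i in range(0,n):
--         for j in range(i + 1, n):
--             if pieces[i] + pieces[j] == targetSize:
--                 arrangements += 1
--             elif pieces[i] == targetSize or pieces[j] == targetSize:
--                 arrangements += 1
--     return arrangements
-- ===== SOURCE B (Python) =====
-- def puzzleArrangements(pieces, targetSize):
--     n = len(pieces)
--     k = pieces.count(targetSize)
--     # pairs where at least one element equals targetSize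
--     arrangements = k * (n - k) + k * (k - 1) // 2
--     # pairs with both elements != targetSize summing to targetSize (one pass, hashmap)
--     seen = {}
--     for x in pieces:
--         if x != targetSize:
--             arrangements += seen.get(targetSize - x, 0)
--             seen[x] = seen.get(x, 0) + 1
--     return arrangements
-- ===== Notes on version B (the rewrite author's own statement) =====
-- stated objective: faster
-- what changed: Replaced the O(n^2) double loop over index pairs by a closed-form count k*(n-k)+k*(k-1)//2 for pairs containing the target plus a one-pass hashmap count of complement-sum pairs among non-target elements.
import Mathlib
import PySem

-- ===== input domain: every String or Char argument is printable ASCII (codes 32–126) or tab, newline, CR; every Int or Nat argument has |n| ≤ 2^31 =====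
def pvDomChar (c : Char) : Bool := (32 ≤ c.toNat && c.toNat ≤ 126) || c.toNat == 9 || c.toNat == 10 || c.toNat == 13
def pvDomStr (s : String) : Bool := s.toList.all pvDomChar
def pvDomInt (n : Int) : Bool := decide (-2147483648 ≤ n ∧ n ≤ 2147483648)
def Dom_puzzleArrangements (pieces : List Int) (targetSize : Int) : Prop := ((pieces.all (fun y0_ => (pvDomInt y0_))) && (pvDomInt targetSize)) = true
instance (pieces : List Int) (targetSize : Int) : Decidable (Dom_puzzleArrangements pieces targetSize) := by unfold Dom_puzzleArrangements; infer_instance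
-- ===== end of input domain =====

-- B replaces A's O(n^2) double loop by a closed-form count of pairs containing the target
-- plus a one-pass hashmap count of complement-sum pairs among non-target elements (faster).

-- ===== PORT A =====
def puzzleArrangements (pieces : List Int) (targetSize : Int) : Int :=
  let n : Int := pieces.length
  (PySem.List.pyRange 0 n 1).foldl (fun arrangements i =>
    (PySem.List.pyRange (i + 1) n 1).foldl (fun arrangements j =>
      if PySem.List.pyGetD pieces i 0 + PySem.List.pyGetD pieces j 0 = targetSize then
        arrangements + 1
      else if PySem.List.pyGetD pieces i 0 = targetSize ∨ PySem.List.pyGetD pieces j 0 = targetSize then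
        arrangements + 1
      else arrangements) arrangements) 0

-- ===== PORT B =====
def puzzleArrangements_alt (pieces : List Int) (targetSize : Int) : Int :=
  let n : Int := pieces.length
  let k : Int := pieces.count targetSize
  let base : Int := k * (n - k) + PySem.Int.floordiv (k * (k - 1)) 2
  let res := pieces.foldl
    (fun (s : Int × PySem.Dict Int Int) x =>
      if x ≠ targetSize then
        (s.1 + s.2.getD (targetSize - x) 0, s.2.insert x (s.2.getD x 0 + 1))
      else s)
    (base, PySem.Dict.empty)
  res.1

-- ===== PRECONDITION & SPEC =====
def Spec_puzzleArrangements (pieces : List Int) (targetSize : Int) (out : Int) : Prop := out = puzzleArrangements_alt pieces targetSize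
instance (pieces : List Int) (targetSize : Int) (out : Int) : Decidable (Spec_puzzleArrangements pieces targetSize out) := by unfold Spec_puzzleArrangements; infer_instance

-- ===== CLAIM (what is proved, stated in full; the proofs are below) =====
def Claim_equal_puzzleArrangements : Prop := ∀ (pieces : List Int) (targetSize : Int), Dom_puzzleArrangements pieces targetSize → Spec_puzzleArrangements pieces targetSize (puzzleArrangements pieces targetSize)

-- ===== LEMMAS AND PROOFS =====

-- pair predicates (t is the target)
def predA (t a b : Int) : Bool := decide (a + b = t ∨ a = t ∨ b = t)
def predT (t a b : Int) : Bool := decide (a = t ∨ b = t)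
def pred1 (t a b : Int) : Bool := decide (a ≠ t ∧ b ≠ t ∧ a + b = t)

-- structural count of ordered pairs i < j satisfying p
def pairCnt (p : Int → Int → Bool) : List Int → Int
  | [] => 0
  | a :: xs => (xs.countP (p a) : Int) + pairCnt p xs

theorem countP_predA_split (t a : Int) (xs : List Int) :
    (xs.countP (predA t a) : Int) = (xs.countP (pred1 t a) : Int) + (xs.countP (predT t a) : Int) := by
  induction xs with
  | nil => simp
  | cons b xs ih =>
    simp only [List.countP_cons]
    push_cast
    rw [ih]
    by_cases h1 : a + b = t <;> by_cases h2 : a = t <;> by_cases h3 : b = t <;>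
      simp [predA, pred1, predT, h1, h2, h3] <;> omega

theorem pairCnt_split (t : Int) (l : List Int) :
    pairCnt (predA t) l = pairCnt (pred1 t) l + pairCnt (predT t) l := by
  induction l with
  | nil => simp [pairCnt]
  | cons a xs ih => simp only [pairCnt, ih, countP_predA_split]; ring

-- closed form for the target-containing pairs
theorem pairCnt_predT (t : Int) (l : List Int) :
    pairCnt (predT t) l
      = (l.count t : Int) * ((l.length : Int) - (l.count t : Int))
        + PySem.Int.floordiv ((l.count t : Int) * ((l.count t : Int) - 1)) 2 := by
  have key : ∀ l : List Int, 2 * pairCnt (predT t) l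
      = 2 * ((l.count t : Int) * ((l.length : Int) - (l.count t : Int)))
        + (l.count t : Int) * ((l.count t : Int) - 1) := by
    intro l
    induction l with
    | nil => simp [pairCnt]
    | cons a xs ih =>
      rw [show pairCnt (predT t) (a :: xs) = (xs.countP (predT t a) : Int) + pairCnt (predT t) xs from rfl]
      by_cases h : a = t
      · subst h
        have hc : xs.countP (predT a a) = xs.length := by
          apply List.countP_eq_length.mpr
          intro b _; simp [predT]
        have hcnt : (a :: xs).count a = xs.count a + 1 := by rw [List.count_cons]; simp
        rw [hc, hcnt]
        push_cast [List.length_cons]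
        nlinarith [ih]
      · have hc : xs.countP (predT t a) = xs.count t := by
          unfold List.count
          apply List.countP_congr
          intro b _; simp [predT, h]
        have hcnt : (a :: xs).count t = xs.count t := by rw [List.count_cons]; simp [h, Ne.symm]
        rw [hc, hcnt]
        push_cast [List.length_cons]
        nlinarith [ih]
  have heven : ∃ j : Int, (l.count t : Int) * ((l.count t : Int) - 1) = 2 * j := by
    obtain ⟨j, hj⟩ := Int.even_mul_succ_self ((l.count t : Int) - 1)
    refine ⟨j, ?_⟩
    have hr : ((l.count t : Int) - 1) * ((l.count t : Int) - 1 + 1) = (l.count t : Int) * ((l.count t : Int) - 1) := by ring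
    omega
  rcases heven with ⟨j, hj⟩
  have hfd : PySem.Int.floordiv ((l.count t : Int) * ((l.count t : Int) - 1)) 2 = j := by
    rw [hj, PySem.Int.floordiv_eq_ediv_of_pos (by norm_num)]
    omega
  have := key l
  omega

-- getD after a counting insert
theorem getD_insert_count (d : PySem.Dict Int Int) (x v : Int) :
    (d.insert x (d.getD x 0 + 1)).getD v 0 = d.getD v 0 + (if v = x then 1 else 0) := by
  by_cases h : v = x
  · subst h
    simp [PySem.Dict.getD, PySem.Dict.get?_insert_self]
  · simp [PySem.Dict.getD, PySem.Dict.get?_insert_of_ne _ _ h, h]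

-- the B-side fold: first component
theorem fold_fst (t : Int) (l : List Int) (c : Int) (d : PySem.Dict Int Int) :
    (l.foldl
      (fun (s : Int × PySem.Dict Int Int) x =>
        if x ≠ t then (s.1 + s.2.getD (t - x) 0, s.2.insert x (s.2.getD x 0 + 1)) else s)
      (c, d)).1
    = c + ((l.filter (fun x => x ≠ t)).map (fun x => d.getD (t - x) 0)).sum + pairCnt (pred1 t) l := by
  induction l generalizing c d with
  | nil => simp [pairCnt]
  | cons a xs ih =>
    by_cases h : a = t
    · subst h
      have hc : xs.countP (pred1 a a) = 0 := by
        apply List.countP_eq_zero.mpr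
        intro b _; simp [pred1]
      rw [List.foldl_cons]
      have hstep : (if a ≠ a then (c + d.getD (a - a) 0, d.insert a (d.getD a 0 + 1)) else ((c : Int), d)) = (c, d) := by simp
      rw [hstep, ih]
      simp [pairCnt, hc]
    · rw [List.foldl_cons]
      have hstep : (if a ≠ t then (c + d.getD (t - a) 0, d.insert a (d.getD a 0 + 1)) else (c, d))
          = (c + d.getD (t - a) 0, d.insert a (d.getD a 0 + 1)) := by simp [h]
      rw [hstep, ih]
      have hmap : ∀ b, (d.insert a (d.getD a 0 + 1)).getD (t - b) 0
          = d.getD (t - b) 0 + (if t - b = a then 1 else 0) := fun b => getD_insert_count d a (t - b)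
      have hsum : ((xs.filter (fun x => x ≠ t)).map
            (fun x => (d.insert a (d.getD a 0 + 1)).getD (t - x) 0)).sum
          = ((xs.filter (fun x => x ≠ t)).map (fun x => d.getD (t - x) 0)).sum
            + ((xs.filter (fun x => x ≠ t)).countP (fun b => decide (t - b = a)) : Int) := by
        induction xs.filter (fun x => x ≠ t) with
        | nil => simp
        | cons y ys ihy =>
          simp only [List.map_cons, List.sum_cons, List.countP_cons, hmap y, ihy]
          split_ifs <;> simp_all <;> ring
      rw [hsum]
      have hcnt : ((xs.filter (fun x => x ≠ t)).countP (fun b => decide (t - b = a)) : Int)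
          = (xs.countP (pred1 t a) : Int) := by
        congr 1
        rw [List.countP_filter]
        apply List.countP_congr
        intro b _
        by_cases hb : b = t
        · simp [pred1, hb]
        · by_cases hab : t - b = a
          · have hs : a + b = t := by omega
            simp [pred1, hb, hab, h, hs]
          · have hs : ¬ a + b = t := by omega
            simp [pred1, hb, hab, hs]
      rw [hcnt]
      simp [pairCnt, h]
      ring

-- A as a sum over indices
def sumS (t : Int) (l : List Int) : Int :=
  ((List.range l.length).map
    (fun k => ((l.drop (k + 1)).countP (predA t (l.getD k 0)) : Int))).sum

theorem sumS_eq_pairCnt (t : Int) (l : List Int) : sumS t l = pairCnt (predA t) l := by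
  induction l with
  | nil => simp [sumS, pairCnt]
  | cons a xs ih =>
    show sumS t (a :: xs) = (xs.countP (predA t a) : Int) + pairCnt (predA t) xs
    rw [← ih]
    unfold sumS
    rw [List.length_cons, List.range_succ_eq_map, List.map_cons, List.map_map]
    have hmap : (List.range xs.length).map
          ((fun k => ((((a :: xs).drop (k + 1)).countP (predA t ((a :: xs).getD k 0))) : Int)) ∘ Nat.succ)
        = (List.range xs.length).map
          (fun k => (((xs.drop (k + 1)).countP (predA t (xs.getD k 0))) : Int)) := by
      apply List.map_congr_left
      intro k hk
      simp [Function.comp_apply, List.drop_succ_cons]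
    rw [hmap]
    simp [List.sum_cons]

-- A's port equals sumS
theorem portA_eq_sumS (pieces : List Int) (t : Int) :
    puzzleArrangements pieces t = sumS t pieces := by
  unfold puzzleArrangements
  simp only []
  have hinner : ∀ i : Int, i ∈ PySem.List.pyRange 0 (pieces.length : Int) 1 →
      ∀ acc : Int,
      (PySem.List.pyRange (i + 1) (pieces.length : Int) 1).foldl
        (fun arrangements j =>
          if PySem.List.pyGetD pieces i 0 + PySem.List.pyGetD pieces j 0 = t then arrangements + 1
          else if PySem.List.pyGetD pieces i 0 = t ∨ PySem.List.pyGetD pieces j 0 = t then arrangements + 1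
          else arrangements) acc
      = acc + ((pieces.drop (i + 1).toNat).countP (predA t (PySem.List.pyGetD pieces i 0)) : Int) := by
    intro i hi acc
    have h0i : 0 ≤ i := (PySem.List.mem_pyRange_one.mp hi).1
    have hstep : (PySem.List.pyRange (i + 1) (pieces.length : Int) 1).foldl
        (fun arrangements j =>
          if PySem.List.pyGetD pieces i 0 + PySem.List.pyGetD pieces j 0 = t then arrangements + 1
          else if PySem.List.pyGetD pieces i 0 = t ∨ PySem.List.pyGetD pieces j 0 = t then arrangements + 1
          else arrangements) acc
        = (PySem.List.pyRange (i + 1) (pieces.length : Int) 1).foldl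
        (fun arrangements j =>
          if predA t (PySem.List.pyGetD pieces i 0) (PySem.List.pyGetD pieces j 0) then arrangements + 1
          else arrangements) acc := by
      apply PySem.List.foldl_congr_mem
      intro a x _
      simp only [predA]
      by_cases h1 : PySem.List.pyGetD pieces i 0 + PySem.List.pyGetD pieces x 0 = t <;>
        by_cases h2 : PySem.List.pyGetD pieces i 0 = t <;>
        by_cases h3 : PySem.List.pyGetD pieces x 0 = t <;>
        simp [h1, h2, h3]
    rw [hstep, PySem.List.foldl_if_add_one]
    congr 1
    have hmap := PySem.List.map_pyGetD_pyRange' (xs := pieces) (a := i + 1) (d := 0) (by omega)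
    have : (pieces.drop (i + 1).toNat).countP (predA t (PySem.List.pyGetD pieces i 0))
        = ((PySem.List.pyRange (i + 1) (pieces.length : Int) 1).map
            (fun j => PySem.List.pyGetD pieces j 0)).countP (predA t (PySem.List.pyGetD pieces i 0)) := by
      rw [hmap]
    rw [this, List.countP_map]
    rfl
  have houter :
      (PySem.List.pyRange 0 (pieces.length : Int) 1).foldl
        (fun arrangements i =>
          (PySem.List.pyRange (i + 1) (pieces.length : Int) 1).foldl
            (fun arrangements j =>
              if PySem.List.pyGetD pieces i 0 + PySem.List.pyGetD pieces j 0 = t then arrangements + 1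
              else if PySem.List.pyGetD pieces i 0 = t ∨ PySem.List.pyGetD pieces j 0 = t then arrangements + 1
              else arrangements) arrangements) 0
      = (PySem.List.pyRange 0 (pieces.length : Int) 1).foldl
          (fun acc i => acc + ((pieces.drop (i + 1).toNat).countP (predA t (PySem.List.pyGetD pieces i 0)) : Int)) 0 :=
    PySem.List.foldl_congr_mem _ _ _ 0 (fun acc x hx => hinner x hx acc)
  rw [houter, PySem.List.foldl_add]
  unfold sumS
  rw [PySem.List.pyRange_zero_natCast, List.map_map, zero_add]
  congr 1
  apply List.map_congr_left
  intro k hk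
  have hkn : (((k : Nat) : Int) + 1).toNat = k + 1 := by omega
  simp [Function.comp_apply, PySem.List.pyGetD_natCast, hkn]

-- ===== VERDICT (by name: the statement is the Claim_ definition above) =====
theorem puzzleArrangements_spec : Claim_equal_puzzleArrangements := by
  intro pieces t _
  unfold Spec_puzzleArrangements puzzleArrangements_alt
  simp only []
  rw [fold_fst]
  rw [portA_eq_sumS, sumS_eq_pairCnt, pairCnt_split, pairCnt_predT]
  simp
  ring
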